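-- pv_equiv track=rewrite | github.com/ScPlaceholder/SC-Toolbox-Beta-V2 | skills/Craft_Database/services/filter_service.py | group_categories
-- ===== SOURCE A (Python) =====
-- def group_categories(categories: list[str]) -> dict[str, list[str]]:
--     """Group full category paths into top-level → subcategory lists."""
--     groups: dict[str, list[str]] = {}
--     for cat in sorted(categories):
--         parts = cat.split(" / ", 1)
--         top = parts[0]
--         sub = parts[1] if len(parts) > 1 else ""
--         groups.setdefault(top, [])
--         if sub and sub not in groups[top]:
--             groups[top].append(sub)
--     return groups
-- ===== SOURCE B (Python) =====
-- def group_categories(categories: list[str]) -> dict[str, list[str]]: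
--     """Group full category paths into top-level -> subcategory lists."""
--     buckets: dict[str, list] = {}  # top -> [min full path, set of subs]
--     for cat in categories:
--         parts = cat.split(" / ", 1)
--         top = parts[0]
--         sub = parts[1] if len(parts) > 1 else ""
--         rec = buckets.get(top)
--         if rec is None:
--             rec = buckets[top] = [cat, set()]
--         elif cat < rec[0]:
--             rec[0] = cat
--         if sub:
--             rec[1].add(sub)
--     ordered = sorted(buckets.items(), key=lambda kv: kv[1][0])
--     return {top: sorted(rec[1]) for top, rec in ordered}
-- ===== Notes on version B (the rewrite author's own statement) =====
-- stated objective: alternative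
-- what changed: A sorts the whole list first and folds over it, appending each sub to its top's list after a linear membership scan; B never sorts the input: it makes one pass in original order collecting per-top a set of subs and the minimal full path, then orders the few buckets by that minimal path and sorts each sub set once at the end.
import Mathlib
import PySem

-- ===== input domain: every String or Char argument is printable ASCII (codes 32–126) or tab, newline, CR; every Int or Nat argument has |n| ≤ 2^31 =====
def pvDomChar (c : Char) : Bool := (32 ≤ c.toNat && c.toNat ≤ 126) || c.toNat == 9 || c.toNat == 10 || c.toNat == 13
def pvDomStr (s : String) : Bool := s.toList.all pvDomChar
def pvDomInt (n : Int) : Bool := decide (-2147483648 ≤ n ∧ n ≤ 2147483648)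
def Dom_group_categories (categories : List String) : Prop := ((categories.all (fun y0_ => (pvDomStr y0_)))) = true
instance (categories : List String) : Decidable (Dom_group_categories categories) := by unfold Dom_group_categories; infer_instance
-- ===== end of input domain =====

-- B replaces A's sort-then-fold (sorted input, per-key list with a membership-checked
-- append) by a single unsorted pass that buckets subcategories into a per-top SET while
-- tracking each top's minimal full path, then sorts the few buckets by that minimum and
-- each sub set once at the end: a different algorithm, not claimed faster.

-- ===== PORT A =====
def group_categories (categories : List String) : List (String × List String) :=
  ((PySem.List.sorted categories (fun c => c) false).foldl
    (fun (groups : PySem.Dict String (List String)) cat =>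
      let parts := (PySem.Str.splitMax? cat " / " 1).getD []
      let top := PySem.List.pyGetD parts 0 ""
      let sub := if 1 < PySem.List.len parts then PySem.List.pyGetD parts 1 "" else ""
      let groups := groups.setdefault top []
      if sub ≠ "" ∧ sub ∉ groups.getD top [] then
        groups.insert top (groups.getD top [] ++ [sub])
      else groups)
    PySem.Dict.empty).items

-- ===== PORT B =====
def group_categories_alt (categories : List String) : List (String × List String) :=
  -- one pass over the ORIGINAL order: top -> (minimal full path seen, set of subs)
  let buckets := categories.foldl
    (fun (d : PySem.Dict String (String × PySem.Set String)) cat =>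
      let parts := (PySem.Str.splitMax? cat " / " 1).getD []
      let top := PySem.List.pyGetD parts 0 ""
      let sub := if 1 < PySem.List.len parts then PySem.List.pyGetD parts 1 "" else ""
      let d := match d.get? top with
        | none => d.insert top (cat, PySem.Set.empty)
        | some r => if cat < r.1 then d.insert top (cat, r.2) else d
      if sub ≠ "" then d.modify top ("", PySem.Set.empty) (fun r => (r.1, PySem.Set.add r.2 sub))
      else d)
    PySem.Dict.empty
  -- buckets ordered by their minimal path, each sub set sorted
  (PySem.List.sorted buckets.items (fun kv => kv.2.1) false).map
    (fun kv => (kv.1, PySem.List.sorted kv.2.2 (fun s => s) false))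

-- ===== PRECONDITION & SPEC =====
def Spec_group_categories (categories : List String) (out : List (String × List String)) : Prop := out = group_categories_alt categories
instance (categories : List String) (out : List (String × List String)) : Decidable (Spec_group_categories categories out) := by unfold Spec_group_categories; infer_instance

-- ===== CLAIM (what is proved, stated in full; the proofs are below) =====
def Claim_equal_group_categories : Prop := ∀ (categories : List String), Dom_group_categories categories → Spec_group_categories categories (group_categories categories)

-- ===== LEMMAS AND PROOFS =====

-- per-path parsing, shared by both models: (top, sub) of one category path
def pvParse (cat : String) : String × String :=
  let parts := (PySem.Str.splitMax? cat " / " 1).getD []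
  (PySem.List.pyGetD parts 0 "",
   if 1 < PySem.List.len parts then PySem.List.pyGetD parts 1 "" else "")

def pvTopOf (c : String) : String := (pvParse c).1
def pvSubOf (c : String) : String := (pvParse c).2

-- ===== A-side model (fold over the sorted list) =====

-- the subcategory list A ends up with for a given top
def pvGather (pairs : List (String × String)) (top : String) : List String :=
  PySem.List.dedup ((pairs.filter (fun q => q.1 == top && q.2 != "")).map Prod.snd)

-- A's loop body, on an already parsed (top, sub) pair
def pvAStep (g : PySem.Dict String (List String)) (p : String × String) : PySem.Dict String (List String) :=
  if p.2 ≠ "" ∧ p.2 ∉ (g.setdefault p.1 []).getD p.1 [] then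
    (g.setdefault p.1 []).insert p.1 ((g.setdefault p.1 []).getD p.1 [] ++ [p.2])
  else g.setdefault p.1 []

-- the model: one row per distinct seen key, carrying its gathered subs
def pvTbl (pairs : List (String × String)) (seen : List String) : PySem.Dict String (List String) :=
  PySem.Dict.mk ((PySem.List.dedup seen).map (fun t => (t, pvGather pairs t)))

def pvAModel (pre : List (String × String)) : PySem.Dict String (List String) :=
  pvTbl pre (pre.map Prod.fst)

lemma pv_keys_tbl (pairs : List (String × String)) (seen : List String) :
    (pvTbl pairs seen).keys = PySem.List.dedup seen := by
  simp [pvTbl, PySem.Dict.keys_mk, List.map_map, Function.comp_def]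

lemma pv_contains_tbl (pairs : List (String × String)) (seen : List String) (t : String) :
    (pvTbl pairs seen).contains t = true ↔ t ∈ seen := by
  rw [PySem.Dict.contains_iff_mem_keys, pv_keys_tbl, PySem.List.mem_dedup]

lemma pv_getD_tbl (pairs : List (String × String)) (seen : List String) (t : String)
    (h : t ∈ seen) : (pvTbl pairs seen).getD t [] = pvGather pairs t := by
  refine PySem.Dict.getD_of_mem_items _ ?_ ?_ []
  · exact List.mem_map.2 ⟨t, (PySem.List.mem_dedup seen t).2 h, rfl⟩
  · rw [pv_keys_tbl]; exact PySem.List.nodup_dedup seen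

lemma pv_dedup_append {α : Type} [DecidableEq α] (xs : List α) (x : α) :
    PySem.List.dedup (xs ++ [x]) =
      if x ∈ xs then PySem.List.dedup xs else PySem.List.dedup xs ++ [x] := by
  simp only [PySem.List.dedup_eq_ofList, PySem.Set.ofList_eq_foldl, List.foldl_append,
    List.foldl_cons, List.foldl_nil]
  rw [← PySem.Set.ofList_eq_foldl, PySem.Set.add_eq_ite]
  simp only [PySem.Set.mem_ofList]

lemma pv_gather_append (pre : List (String × String)) (p : String × String) (t : String) :
    pvGather (pre ++ [p]) t =
      if p.1 = t ∧ p.2 ≠ "" then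
        (if p.2 ∈ pvGather pre t then pvGather pre t else pvGather pre t ++ [p.2])
      else pvGather pre t := by
  unfold pvGather
  rw [List.filter_append]
  by_cases h : p.1 = t ∧ p.2 ≠ ""
  · have hb : (p.1 == t && p.2 != "") = true := by
      simp [h.1, bne_iff_ne.mpr h.2]
    have hf : List.filter (fun q => q.1 == t && q.2 != "") [p] = [p] := by
      rw [List.filter_singleton]; simp [hb]
    rw [hf, if_pos h, List.map_append, List.map_cons, List.map_nil, pv_dedup_append]
    by_cases hm : p.2 ∈ List.map Prod.snd (List.filter (fun q => q.1 == t && q.2 != "") pre)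
    · rw [if_pos hm, if_pos ((PySem.List.mem_dedup _ _).2 hm)]
    · rw [if_neg hm, if_neg (fun hc => hm ((PySem.List.mem_dedup _ _).1 hc))]
  · have hf : List.filter (fun q => q.1 == t && q.2 != "") [p] = [] := by
      have hb : (p.1 == t && p.2 != "") = false := by
        by_cases h1 : p.1 = t
        · have h2 : p.2 = "" := by by_contra h2; exact h ⟨h1, h2⟩
          simp [h2]
        · simp [h1]
      rw [List.filter_singleton]; simp [hb]
    rw [hf, if_neg h, List.append_nil]

lemma pv_gather_of_fresh (pre : List (String × String)) (p : String × String)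
    (h : p.1 ∉ pre.map Prod.fst) :
    pvGather (pre ++ [p]) p.1 = if p.2 ≠ "" then [p.2] else [] := by
  have hf : List.filter (fun q => q.1 == p.1 && q.2 != "") pre = [] := by
    rw [List.filter_eq_nil_iff]
    intro q hq
    have : q.1 ≠ p.1 := fun he => h (List.mem_map.2 ⟨q, hq, he⟩)
    simp [this]
  unfold pvGather
  rw [List.filter_append, hf, List.nil_append]
  by_cases h2 : p.2 = ""
  · have hb : (p.2 != "") = false := by simp [h2]
    rw [List.filter_singleton]
    simp [h2, PySem.List.dedup]
  · have hb : (p.1 == p.1 && p.2 != "") = true := by simp [bne_iff_ne.mpr h2]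
    rw [List.filter_singleton]
    simp only [hb, cond_true, List.map_cons, List.map_nil]
    rw [PySem.List.dedup_eq_ofList,
      PySem.Set.ofList_eq_self_of_nodup _ (List.nodup_singleton _), if_pos h2]

lemma pv_keys_append (pre : List (String × String)) (p : String × String) :
    PySem.List.dedup ((pre ++ [p]).map Prod.fst) =
      if p.1 ∈ pre.map Prod.fst then PySem.List.dedup (pre.map Prod.fst)
      else PySem.List.dedup (pre.map Prod.fst) ++ [p.1] := by
  rw [List.map_append, List.map_cons, List.map_nil, pv_dedup_append]

lemma pv_astep_model (pre : List (String × String)) (p : String × String) :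
    pvAStep (pvAModel pre) p = pvAModel (pre ++ [p]) := by
  unfold pvAStep pvAModel
  by_cases hmem : p.1 ∈ pre.map Prod.fst
  · have hc : (pvTbl pre (pre.map Prod.fst)).contains p.1 = true :=
      (pv_contains_tbl _ _ _).2 hmem
    rw [PySem.Dict.setdefault_of_contains _ _ hc, pv_getD_tbl _ _ _ hmem]
    have hk := pv_keys_append pre p
    rw [if_pos hmem] at hk
    by_cases hcond : p.2 ≠ "" ∧ p.2 ∉ pvGather pre p.1
    · rw [if_pos hcond]
      apply PySem.Dict.ext
      rw [PySem.Dict.items_insert_of_contains _ _ hc]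
      show List.map _ ((PySem.List.dedup (pre.map Prod.fst)).map _) = _
      unfold pvTbl
      rw [hk, List.map_map]
      apply List.map_congr_left
      intro t ht
      by_cases he : t = p.1
      · subst he
        have hg := pv_gather_append pre p p.1
        rw [if_pos ⟨rfl, hcond.1⟩, if_neg hcond.2] at hg
        simp [hg]
      · have hg := pv_gather_append pre p t
        rw [if_neg (fun hh => he hh.1.symm)] at hg
        simp [he, hg]
    · rw [if_neg hcond]
      apply PySem.Dict.ext
      unfold pvTbl
      rw [hk]
      apply List.map_congr_left
      intro t ht
      rw [pv_gather_append]
      by_cases he : p.1 = t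
      · subst he
        by_cases h2 : p.2 = ""
        · rw [if_neg (fun hh => hh.2 h2)]
        · have hin : p.2 ∈ pvGather pre p.1 := by
            by_contra hni; exact hcond ⟨h2, hni⟩
          rw [if_pos ⟨rfl, h2⟩, if_pos hin]
      · rw [if_neg (fun hh => he hh.1)]
  · have hc : (pvTbl pre (pre.map Prod.fst)).contains p.1 = false := by
      rw [Bool.eq_false_iff, Ne, pv_contains_tbl]; exact hmem
    rw [PySem.Dict.setdefault_of_not_contains _ _ hc]
    simp only [PySem.Dict.getD_insert_self]
    have hk := pv_keys_append pre p
    rw [if_neg hmem] at hk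
    have hrest : ∀ t ∈ PySem.List.dedup (pre.map Prod.fst),
        (fun t => (t, pvGather (pre ++ [p]) t)) t = (fun t => (t, pvGather pre t)) t := by
      intro t ht
      have he : p.1 ≠ t := by
        intro hh; exact hmem (hh ▸ (PySem.List.mem_dedup _ _).1 ht)
      simp only
      rw [pv_gather_append, if_neg (fun hh => he hh.1)]
    by_cases h2 : p.2 = ""
    · rw [if_neg (by simp [h2])]
      apply PySem.Dict.ext
      rw [PySem.Dict.items_insert_of_not_contains _ _ hc]
      unfold pvTbl
      rw [hk, List.map_append, List.map_cons, List.map_nil, List.map_congr_left hrest,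
        pv_gather_of_fresh pre p hmem, if_neg (fun hh => hh h2)]
    · rw [if_pos ⟨h2, List.not_mem_nil⟩, List.nil_append,
        PySem.Dict.insert_insert_self]
      apply PySem.Dict.ext
      rw [PySem.Dict.items_insert_of_not_contains _ _ hc]
      unfold pvTbl
      rw [hk, List.map_append, List.map_cons, List.map_nil, List.map_congr_left hrest,
        pv_gather_of_fresh pre p hmem, if_pos h2]

lemma pv_arun (ps pre : List (String × String)) :
    ps.foldl pvAStep (pvAModel pre) = pvAModel (pre ++ ps) := by
  induction ps generalizing pre with
  | nil => simp
  | cons p tl ih =>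
      rw [List.foldl_cons, pv_astep_model, ih]
      congr 1
      simp

-- ===== B-side model (one pass over the original list) =====

def pvTops (l : List String) : List String := PySem.List.dedup (l.map pvTopOf)
def pvBucket (l : List String) (t : String) : List String := l.filter (fun c => pvTopOf c == t)
def pvFMin (x : String) (xs : List String) : String :=
  xs.foldl (fun m c => if c < m then c else m) x
def pvMin (l : List String) (t : String) : String :=
  match pvBucket l t with
  | [] => ""
  | x :: xs => pvFMin x xs
def pvSubsL (l : List String) (t : String) : List String :=
  ((l.map pvParse).filter (fun q => q.1 == t && q.2 != "")).map Prod.snd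
def pvRow (l : List String) (t : String) : String × (String × PySem.Set String) :=
  (t, (pvMin l t, PySem.Set.ofList (pvSubsL l t)))
def pvBTbl (l : List String) : PySem.Dict String (String × PySem.Set String) :=
  PySem.Dict.mk ((pvTops l).map (pvRow l))

-- B's loop body, named
def pvBStep (d : PySem.Dict String (String × PySem.Set String)) (cat : String) :
    PySem.Dict String (String × PySem.Set String) :=
  let parts := (PySem.Str.splitMax? cat " / " 1).getD []
  let top := PySem.List.pyGetD parts 0 ""
  let sub := if 1 < PySem.List.len parts then PySem.List.pyGetD parts 1 "" else ""
  let d := match d.get? top with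
    | none => d.insert top (cat, PySem.Set.empty)
    | some r => if cat < r.1 then d.insert top (cat, r.2) else d
  if sub ≠ "" then d.modify top ("", PySem.Set.empty) (fun r => (r.1, PySem.Set.add r.2 sub))
  else d

lemma pv_fmin_spec (xs : List String) : ∀ x : String,
    pvFMin x xs ∈ x :: xs ∧ ∀ y ∈ x :: xs, pvFMin x xs ≤ y := by
  induction xs with
  | nil => intro x; exact ⟨List.mem_singleton.2 rfl, by intro y hy; simp at hy; simp [hy, pvFMin]⟩
  | cons c xs ih =>
      intro x
      have hstep : pvFMin x (c :: xs) = pvFMin (if c < x then c else x) xs := rfl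
      obtain ⟨hm, hle⟩ := ih (if c < x then c else x)
      constructor
      · rw [hstep]
        rcases List.mem_cons.1 hm with h | h
        · rw [h]
          split_ifs
          · exact List.mem_cons_of_mem _ List.mem_cons_self
          · exact List.mem_cons_self
        · exact List.mem_cons_of_mem _ (List.mem_cons_of_mem _ h)
      · intro y hy
        rw [hstep]
        have hite : pvFMin (if c < x then c else x) xs ≤ (if c < x then c else x) :=
          hle _ List.mem_cons_self
        rcases List.mem_cons.1 hy with h | h
        · subst h
          refine le_trans hite ?_
          split_ifs with hc
          · exact le_of_lt hc
          · exact le_refl _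
        · rcases List.mem_cons.1 h with h' | h'
          · subst h'
            refine le_trans hite ?_
            split_ifs with hc
            · exact le_refl _
            · exact le_of_not_gt hc
          · exact hle _ (List.mem_cons_of_mem _ h')

lemma pv_mem_bucket (l : List String) (t c : String) :
    c ∈ pvBucket l t ↔ c ∈ l ∧ pvTopOf c = t := by
  simp [pvBucket, List.mem_filter]

lemma pv_bucket_ne_nil (l : List String) (t : String) :
    pvBucket l t ≠ [] ↔ t ∈ l.map pvTopOf := by
  constructor
  · intro h
    rcases List.exists_mem_of_ne_nil _ h with ⟨c, hc⟩
    rw [pv_mem_bucket] at hc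
    exact List.mem_map.2 ⟨c, hc.1, hc.2⟩
  · intro h hnil
    rcases List.mem_map.1 h with ⟨c, hcl, hct⟩
    have : c ∈ pvBucket l t := (pv_mem_bucket l t c).2 ⟨hcl, hct⟩
    simp [hnil] at this

lemma pv_min_mem (l : List String) (t : String) (h : pvBucket l t ≠ []) :
    pvMin l t ∈ pvBucket l t := by
  rcases hb : pvBucket l t with _ | ⟨x, xs⟩
  · exact absurd hb h
  · unfold pvMin
    rw [hb]
    exact (pv_fmin_spec xs x).1

lemma pv_min_le (l : List String) (t : String) :
    ∀ y ∈ pvBucket l t, pvMin l t ≤ y := by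
  intro y hy
  rcases hb : pvBucket l t with _ | ⟨x, xs⟩
  · rw [hb] at hy; simp at hy
  · rw [hb] at hy
    unfold pvMin
    rw [hb]
    exact (pv_fmin_spec xs x).2 y hy

lemma pv_min_congr (l₁ l₂ : List String) (t : String)
    (h : ∀ c, c ∈ l₁ ↔ c ∈ l₂) (hne : pvBucket l₁ t ≠ []) :
    pvMin l₁ t = pvMin l₂ t := by
  have hbk : ∀ c, c ∈ pvBucket l₁ t ↔ c ∈ pvBucket l₂ t := by
    intro c; rw [pv_mem_bucket, pv_mem_bucket, h]
  have hne₂ : pvBucket l₂ t ≠ [] := by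
    intro h2
    rcases List.exists_mem_of_ne_nil _ hne with ⟨c, hc⟩
    have := (hbk c).1 hc
    simp [h2] at this
  apply le_antisymm
  · exact pv_min_le l₁ t _ ((hbk _).2 (pv_min_mem l₂ t hne₂))
  · exact pv_min_le l₂ t _ ((hbk _).1 (pv_min_mem l₁ t hne))

lemma pv_dedup_sublist {α : Type} [DecidableEq α] (xs : List α) :
    List.Sublist (PySem.List.dedup xs) xs := by
  induction xs with
  | nil => simp [PySem.List.dedup]
  | cons x xs ih =>
      rw [PySem.List.dedup_eq_ofList, PySem.Set.ofList_cons]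
      refine List.Sublist.cons₂ x ?_
      have h1 : List.Sublist ((PySem.Set.ofList xs).discard x) (PySem.Set.ofList xs) := by
        simp only [PySem.Set.discard]
        exact List.filter_sublist
      rw [PySem.List.dedup_eq_ofList] at ih
      exact h1.trans ih

lemma pv_dedup_pairwise_lt (xs : List String) (h : xs.Pairwise (· ≤ ·)) :
    (PySem.List.dedup xs).Pairwise (· < ·) := by
  have h1 : (PySem.List.dedup xs).Pairwise (· ≤ ·) :=
    h.sublist (pv_dedup_sublist xs)
  have h2 : (PySem.List.dedup xs).Pairwise (· ≠ ·) := PySem.List.nodup_dedup xs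
  exact (h1.and h2).imp (fun hab => lt_of_le_of_ne hab.1 hab.2)

lemma pv_min_pairwise (l : List String) (h : l.Pairwise (· ≤ ·)) :
    (pvTops l).Pairwise (fun a b => pvMin l a < pvMin l b) := by
  induction l with
  | nil => simp [pvTops, PySem.List.dedup]
  | cons c rest ih =>
      rcases List.pairwise_cons.1 h with ⟨hc, hrest⟩
      have hT : pvTops (c :: rest)
          = pvTopOf c :: (pvTops rest).filter (fun y => !(y == pvTopOf c)) := by
        simp only [pvTops, List.map_cons, PySem.List.dedup_eq_ofList, PySem.Set.ofList_cons,
          PySem.Set.discard]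
      have hbucket_cons : ∀ t, pvBucket (c :: rest) t =
          if pvTopOf c == t then c :: pvBucket rest t else pvBucket rest t := by
        intro t; simp [pvBucket, List.filter_cons]
      have hmin_ne : ∀ t, t ≠ pvTopOf c → pvMin (c :: rest) t = pvMin rest t := by
        intro t hne
        unfold pvMin
        rw [hbucket_cons t, if_neg (by simp [Ne.symm hne])]
      rw [hT]
      refine List.pairwise_cons.2 ⟨?_, ?_⟩
      · intro t ht
        rw [List.mem_filter] at ht
        have htne : t ≠ pvTopOf c := by
          intro hh; simp [hh] at ht
        have htmem : t ∈ rest.map pvTopOf := (PySem.List.mem_dedup _ _).1 ht.1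
        have hbne : pvBucket rest t ≠ [] := (pv_bucket_ne_nil rest t).2 htmem
        have hmem_t : pvMin rest t ∈ pvBucket rest t := pv_min_mem rest t hbne
        rw [pv_mem_bucket] at hmem_t
        -- min of the c-bucket in c::rest
        have hc_mem : c ∈ pvBucket (c :: rest) (pvTopOf c) := by
          rw [pv_mem_bucket]; exact ⟨List.mem_cons_self, rfl⟩
        have hbne0 : pvBucket (c :: rest) (pvTopOf c) ≠ [] := by
          intro hh; rw [hh] at hc_mem; simp at hc_mem
        have hm0_le_c : pvMin (c :: rest) (pvTopOf c) ≤ c :=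
          pv_min_le _ _ c hc_mem
        have hc_le : c ≤ pvMin rest t := hc _ hmem_t.1
        have hm0_mem : pvMin (c :: rest) (pvTopOf c) ∈ pvBucket (c :: rest) (pvTopOf c) :=
          pv_min_mem _ _ hbne0
        rw [pv_mem_bucket] at hm0_mem
        have hne_val : pvMin (c :: rest) (pvTopOf c) ≠ pvMin rest t := by
          intro hh
          apply htne
          rw [← hmem_t.2, ← hh, hm0_mem.2]
        rw [hmin_ne t htne]
        exact lt_of_le_of_ne (le_trans hm0_le_c hc_le) hne_val
      · have hsub : List.Sublist ((pvTops rest).filter (fun y => !(y == pvTopOf c))) (pvTops rest) :=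
          List.filter_sublist
        refine ((ih hrest).sublist hsub).imp_of_mem ?_
        intro a b ha hb hab
        rw [List.mem_filter] at ha hb
        have hane : a ≠ pvTopOf c := by intro hh; simp [hh] at ha
        have hbne : b ≠ pvTopOf c := by intro hh; simp [hh] at hb
        rw [hmin_ne a hane, hmin_ne b hbne]
        exact hab

-- ===== the split lemma: a path with a non-empty sub is top ++ " / " ++ sub =====

lemma pv_go_zero (fuel : Nat) (l : List Char) (acc : List (List Char)) :
    PySem.Chars.splitOnMax.go [' ', '/', ' '] fuel 0 l [] acc = (l :: acc).reverse := by
  cases fuel <;> cases l <;> rfl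

lemma pv_go_cons (f m : Nat) (ch : Char) (rest cur : List Char) (acc : List (List Char)) :
    PySem.Chars.splitOnMax.go [' ', '/', ' '] (f + 1) (m + 1) (ch :: rest) cur acc =
      if [' ', '/', ' '].isPrefixOf (ch :: rest) = true then
        PySem.Chars.splitOnMax.go [' ', '/', ' '] f m
          (List.drop 3 (ch :: rest)) [] (cur.reverse :: acc)
      else PySem.Chars.splitOnMax.go [' ', '/', ' '] f (m + 1) rest (ch :: cur) acc := rfl

lemma pv_go_one (fuel : Nat) : ∀ (l cur : List Char),
    PySem.Chars.splitOnMax.go [' ', '/', ' '] fuel 1 l cur [] = [cur.reverse ++ l] ∨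
    ∃ a b, PySem.Chars.splitOnMax.go [' ', '/', ' '] fuel 1 l cur [] = [a, b] ∧
      cur.reverse ++ l = a ++ [' ', '/', ' '] ++ b := by
  induction fuel with
  | zero => intro l cur; left; rfl
  | succ f ih =>
      intro l cur
      cases l with
      | nil =>
          left
          show (cur.reverse :: ([] : List (List Char))).reverse = [cur.reverse ++ []]
          simp
      | cons ch rest =>
          rw [pv_go_cons]
          split_ifs with hpre
          · right
            refine ⟨cur.reverse, List.drop 3 (ch :: rest), ?_, ?_⟩
            · rw [pv_go_zero]; rfl
            · have hp : [' ', '/', ' '] <+: (ch :: rest) :=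
                List.isPrefixOf_iff_prefix.1 hpre
              have := List.prefix_iff_eq_append.1 hp
              rw [List.append_assoc]
              exact congrArg (cur.reverse ++ ·) this.symm
          · have := ih rest (ch :: cur)
            have hrw : (ch :: cur).reverse ++ rest = cur.reverse ++ ch :: rest := by
              simp
            rcases this with h | ⟨a, b, h1, h2⟩
            · left; rw [h, hrw]
            · right; exact ⟨a, b, h1, by rw [← hrw, h2]⟩

lemma pv_parse_concat (x : String) (h : (pvParse x).2 ≠ "") :
    x.toList = (pvParse x).1.toList ++ [' ', '/', ' '] ++ (pvParse x).2.toList := by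
  have hsep : (" / " : String).toList = [' ', '/', ' '] := rfl
  have hmap := PySem.Str.splitMax?_map x " / " 1
  have hsome : PySem.Chars.splitMax? x.toList (" / ").toList 1
      = some (PySem.Chars.splitOnMax x.toList [' ', '/', ' '] 1) := by
    rw [hsep]; rfl
  rw [hsome] at hmap
  rcases hps : PySem.Str.splitMax? x " / " 1 with _ | ps
  · rw [hps] at hmap; simp at hmap
  · rw [hps] at hmap
    simp only [Option.map_some, Option.some.injEq] at hmap
    have hgo : PySem.Chars.splitOnMax x.toList [' ', '/', ' '] 1
        = PySem.Chars.splitOnMax.go [' ', '/', ' '] (x.toList.length + 1) 1 x.toList [] [] := by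
      rfl
    rcases pv_go_one (x.toList.length + 1) x.toList [] with hone | ⟨a, b, hone, hcat⟩
    · -- one part: sub is "", contradiction
      exfalso
      rw [hgo, hone] at hmap
      rcases ps with _ | ⟨p0, ps'⟩
      · simp at hmap
      · rcases ps' with _ | ⟨p1, ps''⟩
        · apply h
          simp [pvParse, hps, PySem.List.len]
        · simp at hmap
    · rw [hgo, hone] at hmap
      rcases ps with _ | ⟨p0, ps'⟩
      · simp at hmap
      · rcases ps' with _ | ⟨p1, ps''⟩
        · simp at hmap
        · rcases ps'' with _ | _
          · simp only [List.map_cons, List.map_nil, List.cons.injEq, and_true] at hmap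
            have hparse : pvParse x = (p0, p1) := by
              simp [pvParse, hps, PySem.List.len, PySem.List.pyGetD_ofNat']
            rw [hparse]
            simp only [List.reverse_nil, List.nil_append] at hcat
            rw [hcat, hmap.1, hmap.2]
          · simp at hmap

lemma pv_cons_le_cancel (a : Char) (u v : List Char)
    (h : @LE.le (List Char) List.LE' (a :: u) (a :: v)) :
    @LE.le (List Char) List.LE' u v := by
  rcases lt_or_eq_of_le h with h' | h'
  · have hx : List.Lex (· < ·) (a :: u) (a :: v) := h'
    cases hx with
    | cons h'' => exact le_of_lt (h'' : @LT.lt (List Char) List.instLinearOrder.toLT u v)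
    | rel h'' => exact absurd h'' (lt_irrefl a)
  · injection h' with h1 h2
    exact le_of_eq h2

lemma pv_append_le_cancel (p : List Char) : ∀ u v : List Char,
    @LE.le (List Char) List.LE' (p ++ u) (p ++ v) → @LE.le (List Char) List.LE' u v := by
  induction p with
  | nil => intro u v h; exact h
  | cons a p ih =>
      intro u v h
      simp only [List.cons_append] at h
      exact ih u v (pv_cons_le_cancel a _ _ h)

lemma pv_sub_le (x y : String) (hxy : x ≤ y) (ht : pvTopOf x = pvTopOf y)
    (hx : pvSubOf x ≠ "") (hy : pvSubOf y ≠ "") : pvSubOf x ≤ pvSubOf y := by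
  have hcx := pv_parse_concat x hx
  have hcy := pv_parse_concat y hy
  rw [String.le_iff_toList_le] at hxy
  rw [hcx, hcy] at hxy
  unfold pvTopOf at ht
  rw [ht] at hxy
  rw [List.append_assoc, List.append_assoc] at hxy
  have h1 := pv_append_le_cancel _ _ _ hxy
  have h2 := pv_append_le_cancel [' ', '/', ' '] _ _ h1
  rw [String.le_iff_toList_le]
  exact h2

lemma pv_subs_pairwise (l : List String) (h : l.Pairwise (· ≤ ·)) (t : String) :
    (pvSubsL l t).Pairwise (· ≤ ·) := by
  unfold pvSubsL
  rw [List.pairwise_map, List.pairwise_filter, List.pairwise_map]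
  refine h.imp_of_mem ?_
  intro a b _ _ hab hpa hpb
  simp only [Bool.and_eq_true, beq_iff_eq, bne_iff_ne, ne_eq] at hpa hpb
  exact pv_sub_le a b hab (by rw [pvTopOf, pvTopOf, hpa.1, hpb.1]) hpa.2 hpb.2

-- ===== B's fold reaches the model table =====

lemma pv_keys_btbl (l : List String) : (pvBTbl l).keys = pvTops l := by
  simp [pvBTbl, PySem.Dict.keys_mk, List.map_map, Function.comp_def, pvRow]

lemma pv_nodup_keys_btbl (l : List String) : (pvBTbl l).keys.Nodup := by
  rw [pv_keys_btbl]; exact PySem.List.nodup_dedup _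

lemma pv_get?_btbl_mem (l : List String) (t : String) (h : t ∈ pvTops l) :
    (pvBTbl l).get? t = some (pvMin l t, PySem.Set.ofList (pvSubsL l t)) := by
  exact PySem.Dict.get?_of_mem_items _ (List.mem_map.2 ⟨t, h, rfl⟩) (pv_nodup_keys_btbl l)

lemma pv_get?_btbl_none (l : List String) (t : String) (h : t ∉ pvTops l) :
    (pvBTbl l).get? t = none := by
  rw [PySem.Dict.get?_eq_none_iff_contains]
  rw [Bool.eq_false_iff, Ne, PySem.Dict.contains_iff_mem_keys, pv_keys_btbl]
  exact h

lemma pv_tops_append (pre : List String) (c : String) :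
    pvTops (pre ++ [c]) =
      if pvTopOf c ∈ pvTops pre then pvTops pre else pvTops pre ++ [pvTopOf c] := by
  unfold pvTops
  rw [List.map_append, List.map_cons, List.map_nil, pv_dedup_append]
  by_cases h : pvTopOf c ∈ pre.map pvTopOf
  · rw [if_pos h, if_pos ((PySem.List.mem_dedup _ _).2 h)]
  · rw [if_neg h, if_neg (fun hh => h ((PySem.List.mem_dedup _ _).1 hh))]

lemma pv_bucket_append (pre : List String) (c : String) (t : String) :
    pvBucket (pre ++ [c]) t =
      if pvTopOf c = t then pvBucket pre t ++ [c] else pvBucket pre t := by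
  unfold pvBucket
  rw [List.filter_append, List.filter_singleton]
  by_cases h : pvTopOf c = t
  · simp [h]
  · have hb : (pvTopOf c == t) = false := beq_eq_false_iff_ne.2 h
    simp [hb, h]

lemma pv_min_append_ne (pre : List String) (c t : String) (h : pvTopOf c ≠ t) :
    pvMin (pre ++ [c]) t = pvMin pre t := by
  unfold pvMin
  rw [pv_bucket_append, if_neg h]

lemma pv_min_append_self_fresh (pre : List String) (c : String)
    (h : pvBucket pre (pvTopOf c) = []) : pvMin (pre ++ [c]) (pvTopOf c) = c := by
  unfold pvMin
  rw [pv_bucket_append, if_pos rfl, h, List.nil_append]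
  rfl

lemma pv_min_append_self (pre : List String) (c : String)
    (h : pvBucket pre (pvTopOf c) ≠ []) :
    pvMin (pre ++ [c]) (pvTopOf c) =
      if c < pvMin pre (pvTopOf c) then c else pvMin pre (pvTopOf c) := by
  unfold pvMin
  rw [pv_bucket_append, if_pos rfl]
  rcases hb : pvBucket pre (pvTopOf c) with _ | ⟨x, xs⟩
  · exact absurd hb h
  · show pvFMin x (xs ++ [c]) = _
    unfold pvFMin
    rw [List.foldl_append]
    rfl

lemma pv_subs_append (pre : List String) (c t : String) :
    pvSubsL (pre ++ [c]) t =
      if pvTopOf c = t ∧ pvSubOf c ≠ "" then pvSubsL pre t ++ [pvSubOf c]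
      else pvSubsL pre t := by
  unfold pvSubsL
  rw [List.map_append, List.map_cons, List.map_nil, List.filter_append,
    List.filter_singleton]
  by_cases h : pvTopOf c = t ∧ pvSubOf c ≠ ""
  · have hb : ((pvParse c).1 == t && (pvParse c).2 != "") = true := by
      simp only [Bool.and_eq_true, beq_iff_eq, bne_iff_ne]
      exact ⟨h.1, h.2⟩
    rw [if_pos h, hb]
    simp [pvSubOf]
  · have hb : ((pvParse c).1 == t && (pvParse c).2 != "") = false := by
      rw [Bool.eq_false_iff]
      simp only [Ne, Bool.and_eq_true, beq_iff_eq, bne_iff_ne]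
      intro hh; exact h ⟨hh.1, hh.2⟩
    rw [if_neg h, hb]
    simp

lemma pv_row_append_ne (pre : List String) (c t : String) (h : t ≠ pvTopOf c) :
    pvRow (pre ++ [c]) t = pvRow pre t := by
  unfold pvRow
  rw [pv_min_append_ne pre c t (Ne.symm h), pv_subs_append,
    if_neg (fun hh => h hh.1.symm)]

lemma pv_subs_nil_of_bucket_nil (pre : List String) (t : String)
    (h : pvBucket pre t = []) : pvSubsL pre t = [] := by
  unfold pvSubsL
  rw [List.map_eq_nil_iff, List.filter_eq_nil_iff]
  intro q hq
  rcases List.mem_map.1 hq with ⟨c, hcl, hcq⟩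
  simp only [Bool.and_eq_true, beq_iff_eq, bne_iff_ne, not_and]
  intro h1 _
  have : c ∈ pvBucket pre t := (pv_mem_bucket pre t c).2 ⟨hcl, by rw [pvTopOf, hcq, h1]⟩
  rw [h] at this
  simp at this

lemma pv_insert_row (pre : List String) (t0 : String)
    (hcont : (pvBTbl pre).contains t0 = true) (v : String × PySem.Set String) :
    (pvBTbl pre).insert t0 v
      = PySem.Dict.mk ((pvTops pre).map (fun t => if t = t0 then (t0, v) else pvRow pre t)) := by
  apply PySem.Dict.ext
  rw [PySem.Dict.items_insert_of_contains _ _ hcont]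
  show ((pvTops pre).map (pvRow pre)).map _ = _
  rw [List.map_map]
  apply List.map_congr_left
  intro t ht
  by_cases he : t = t0
  · subst he
    simp [pvRow]
  · simp [pvRow, he]

lemma pv_bstep_model (pre : List String) (c : String) :
    pvBStep (pvBTbl pre) c = pvBTbl (pre ++ [c]) := by
  have hps : pvBStep (pvBTbl pre) c =
      (let d := match (pvBTbl pre).get? (pvTopOf c) with
        | none => (pvBTbl pre).insert (pvTopOf c) (c, PySem.Set.empty)
        | some r => if c < r.1 then (pvBTbl pre).insert (pvTopOf c) (c, r.2) else (pvBTbl pre)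
      if pvSubOf c ≠ "" then
        d.modify (pvTopOf c) ("", PySem.Set.empty) (fun r => (r.1, PySem.Set.add r.2 (pvSubOf c)))
      else d) := rfl
  rw [hps]
  by_cases hmem : pvTopOf c ∈ pvTops pre
  · -- key already present
    have hbne : pvBucket pre (pvTopOf c) ≠ [] :=
      (pv_bucket_ne_nil pre (pvTopOf c)).2 ((PySem.List.mem_dedup _ _).1 hmem)
    have hcont : (pvBTbl pre).contains (pvTopOf c) = true := by
      rw [PySem.Dict.contains_iff_mem_keys, pv_keys_btbl]; exact hmem
    rw [pv_get?_btbl_mem pre _ hmem]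
    simp only
    have htops : pvTops (pre ++ [c]) = pvTops pre := by
      rw [pv_tops_append, if_pos hmem]
    have hnewmin : pvMin (pre ++ [c]) (pvTopOf c)
        = if c < pvMin pre (pvTopOf c) then c else pvMin pre (pvTopOf c) :=
      pv_min_append_self pre c hbne
    have hnewsubs : PySem.Set.ofList (pvSubsL (pre ++ [c]) (pvTopOf c))
        = (if pvSubOf c ≠ "" then
            PySem.Set.add (PySem.Set.ofList (pvSubsL pre (pvTopOf c))) (pvSubOf c)
          else PySem.Set.ofList (pvSubsL pre (pvTopOf c))) := by
      rw [pv_subs_append]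
      by_cases hs : pvSubOf c = ""
      · rw [if_neg (fun hh => hh.2 hs), if_neg (fun hh => hh hs)]
      · rw [if_pos ⟨rfl, hs⟩, if_pos hs, PySem.Set.ofList_append_singleton]
    -- inserting the updated row value at the existing key yields the new table
    have key : ∀ v : String × PySem.Set String, v = (pvRow (pre ++ [c]) (pvTopOf c)).2 →
        (pvBTbl pre).insert (pvTopOf c) v = pvBTbl (pre ++ [c]) := by
      intro v hv
      rw [pv_insert_row pre _ hcont v]
      apply PySem.Dict.ext
      show _ = (pvTops (pre ++ [c])).map (pvRow (pre ++ [c]))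
      rw [htops]
      apply List.map_congr_left
      intro t ht
      by_cases he : t = pvTopOf c
      · subst he
        rw [if_pos rfl, hv]
        rfl
      · rw [if_neg he, pv_row_append_ne pre c t he]
    have hrow2 : (pvRow (pre ++ [c]) (pvTopOf c)).2
        = (if c < pvMin pre (pvTopOf c) then c else pvMin pre (pvTopOf c),
           if pvSubOf c ≠ "" then
             PySem.Set.add (PySem.Set.ofList (pvSubsL pre (pvTopOf c))) (pvSubOf c)
           else PySem.Set.ofList (pvSubsL pre (pvTopOf c))) := by
      show (pvMin (pre ++ [c]) (pvTopOf c), PySem.Set.ofList (pvSubsL (pre ++ [c]) (pvTopOf c))) = _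
      rw [hnewmin, hnewsubs]
    by_cases hlt : c < pvMin pre (pvTopOf c) <;> by_cases hs : pvSubOf c = ""
    · -- inserted new min, no sub
      rw [if_pos hlt, if_neg (fun hh => hh hs)]
      apply key
      rw [hrow2, if_pos hlt, if_neg (fun hh => hh hs)]
    · -- inserted new min, sub added
      rw [if_pos hlt, if_pos hs]
      simp only [PySem.Dict.modify, PySem.Dict.getD_insert_self,
        PySem.Dict.insert_insert_self]
      apply key
      rw [hrow2, if_pos hlt, if_pos hs]
    · -- min kept, no sub: nothing changes
      rw [if_neg hlt, if_neg (fun hh => hh hs)]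
      have := key (pvMin pre (pvTopOf c), PySem.Set.ofList (pvSubsL pre (pvTopOf c)))
        (by rw [hrow2, if_neg hlt, if_neg (fun hh => hh hs)])
      rw [← this, pv_insert_row pre _ hcont]
      apply PySem.Dict.ext
      show (pvTops pre).map (pvRow pre) = _
      apply List.map_congr_left
      intro t ht
      by_cases he : t = pvTopOf c
      · subst he
        rw [if_pos rfl]
        rfl
      · rw [if_neg he]
    · -- min kept, sub added
      rw [if_neg hlt, if_pos hs]
      simp only [PySem.Dict.modify]
      have hgetD : (pvBTbl pre).getD (pvTopOf c) ("", PySem.Set.empty)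
          = (pvMin pre (pvTopOf c), PySem.Set.ofList (pvSubsL pre (pvTopOf c))) := by
        rw [PySem.Dict.getD_eq_get?_getD, pv_get?_btbl_mem pre _ hmem]
        rfl
      rw [hgetD]
      apply key
      rw [hrow2, if_neg hlt, if_pos hs]
  · -- fresh key
    have hbnil : pvBucket pre (pvTopOf c) = [] := by
      by_contra hh
      exact hmem ((PySem.List.mem_dedup _ _).2 ((pv_bucket_ne_nil pre (pvTopOf c)).1 hh))
    have hcont : (pvBTbl pre).contains (pvTopOf c) = false := by
      rw [Bool.eq_false_iff, Ne, PySem.Dict.contains_iff_mem_keys, pv_keys_btbl]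
      exact hmem
    rw [pv_get?_btbl_none pre _ hmem]
    simp only
    have htops : pvTops (pre ++ [c]) = pvTops pre ++ [pvTopOf c] := by
      rw [pv_tops_append, if_neg hmem]
    have hsubsnil : pvSubsL pre (pvTopOf c) = [] := pv_subs_nil_of_bucket_nil pre _ hbnil
    have hminc : pvMin (pre ++ [c]) (pvTopOf c) = c := pv_min_append_self_fresh pre c hbnil
    have hrow_old : ∀ t ∈ pvTops pre, pvRow (pre ++ [c]) t = pvRow pre t := by
      intro t ht
      have : t ≠ pvTopOf c := fun hh => hmem (hh ▸ ht)
      exact pv_row_append_ne pre c t this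
    have hitems : (pvBTbl (pre ++ [c])).items
        = ((pvTops pre).map (pvRow pre)) ++ [pvRow (pre ++ [c]) (pvTopOf c)] := by
      show ((pvTops (pre ++ [c])).map (pvRow (pre ++ [c]))) = _
      rw [htops, List.map_append, List.map_cons, List.map_nil, List.map_congr_left hrow_old]
    by_cases hs : pvSubOf c = ""
    · rw [if_neg (fun hh => hh hs)]
      apply PySem.Dict.ext
      rw [PySem.Dict.items_insert_of_not_contains _ _ hcont, hitems]
      congr 1
      unfold pvRow
      rw [hminc, pv_subs_append, if_neg (fun hh => hh.2 hs), hsubsnil]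
      rfl
    · rw [if_pos hs]
      simp only [PySem.Dict.modify, PySem.Dict.getD_insert_self,
        PySem.Dict.insert_insert_self]
      apply PySem.Dict.ext
      rw [PySem.Dict.items_insert_of_not_contains _ _ hcont, hitems]
      congr 1
      unfold pvRow
      rw [hminc, pv_subs_append, if_pos ⟨rfl, hs⟩, hsubsnil, List.nil_append]
      rfl

lemma pv_brun (l pre : List String) :
    l.foldl pvBStep (pvBTbl pre) = pvBTbl (pre ++ l) := by
  induction l generalizing pre with
  | nil => simp
  | cons c tl ih =>
      rw [List.foldl_cons, pv_bstep_model, ih]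
      congr 1
      simp

-- ===== VERDICT (by name: the statement is the Claim_ definition above) =====
theorem group_categories_spec : Claim_equal_group_categories := by
  intro categories _
  unfold Spec_group_categories
  set S := PySem.List.sorted categories (fun c => c) false with hS
  have hperm : S.Perm categories := PySem.List.sorted_perm categories (fun c => c) false
  have hpair : S.Pairwise (· ≤ ·) := by
    have := PySem.List.sorted_pairwise categories (fun c => c)
    exact this
  -- A's value
  have e1 : group_categories categories
      = ((S.map pvParse).foldl pvAStep (pvAModel [])).items := by
    show (S.foldl _ PySem.Dict.empty).items = _
    rw [List.foldl_map]; rfl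
  rw [pv_arun, List.nil_append] at e1
  have eA : group_categories categories
      = (pvTops S).map (fun t => (t, pvGather (S.map pvParse) t)) := by
    rw [e1]
    show ((PySem.List.dedup ((S.map pvParse).map Prod.fst)).map _) = _
    rw [List.map_map]
    rfl
  -- B's value
  have e0 : group_categories_alt categories
      = (PySem.List.sorted (categories.foldl pvBStep PySem.Dict.empty).items (fun kv => kv.2.1) false).map
          (fun kv => (kv.1, PySem.List.sorted kv.2.2 (fun s => s) false)) := rfl
  have hfold : categories.foldl pvBStep PySem.Dict.empty = pvBTbl categories := by
    have h1 : PySem.Dict.empty = pvBTbl ([] : List String) := rfl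
    rw [h1, pv_brun, List.nil_append]
  have e2 : group_categories_alt categories
      = (PySem.List.sorted ((pvTops categories).map (pvRow categories)) (fun kv => kv.2.1) false).map
          (fun kv => (kv.1, PySem.List.sorted kv.2.2 (fun s => s) false)) := by
    rw [e0, hfold]
    rfl
  rw [eA, e2]
  -- membership of tops is the same over S and categories
  have hmemeq : ∀ z, z ∈ S ↔ z ∈ categories := fun z => hperm.mem_iff
  have htopsmem : ∀ t, t ∈ pvTops S ↔ t ∈ pvTops categories := by
    intro t
    unfold pvTops
    rw [PySem.List.mem_dedup, PySem.List.mem_dedup, List.mem_map, List.mem_map]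
    constructor
    · rintro ⟨c, hc, rfl⟩; exact ⟨c, (hmemeq c).1 hc, rfl⟩
    · rintro ⟨c, hc, rfl⟩; exact ⟨c, (hmemeq c).2 hc, rfl⟩
  have htopsperm : (pvTops S).Perm (pvTops categories) :=
    (List.perm_ext_iff_of_nodup (PySem.List.nodup_dedup _) (PySem.List.nodup_dedup _)).2 htopsmem
  -- step 1: the sort by minimal path produces the rows in pvTops S order
  have hstep1 : PySem.List.sorted ((pvTops categories).map (pvRow categories)) (fun kv => kv.2.1) false
      = (pvTops S).map (pvRow categories) := by
    apply PySem.List.sorted_eq_of_perm_of_pairwise_lt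
    · exact htopsperm.map _
    · rw [List.pairwise_map]
      have hminS := pv_min_pairwise S hpair
      refine hminS.imp_of_mem ?_
      intro a b ha hb hab
      show pvMin categories a < pvMin categories b
      have hbnea : pvBucket S a ≠ [] :=
        (pv_bucket_ne_nil S a).2 ((PySem.List.mem_dedup _ _).1 ha)
      have hbneb : pvBucket S b ≠ [] :=
        (pv_bucket_ne_nil S b).2 ((PySem.List.mem_dedup _ _).1 hb)
      rw [← pv_min_congr S categories a hmemeq hbnea,
        ← pv_min_congr S categories b hmemeq hbneb]
      exact hab
  rw [hstep1, List.map_map]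
  -- step 2: each row's sorted sub set is A's gathered list
  apply List.map_congr_left
  intro t ht
  simp only [Function.comp_def, pvRow]
  have hsubsperm : (pvSubsL S t).Perm (pvSubsL categories t) :=
    ((hperm.map pvParse).filter _).map _
  have hgather : pvGather (S.map pvParse) t = PySem.List.dedup (pvSubsL S t) := rfl
  have hsorted : PySem.List.sorted (PySem.Set.ofList (pvSubsL categories t)) (fun s => s) false
      = PySem.List.dedup (pvSubsL S t) := by
    apply PySem.List.sorted_eq_of_perm_of_pairwise_lt
    · refine (List.perm_ext_iff_of_nodup (PySem.List.nodup_dedup _)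
        (PySem.Set.nodup_ofList _)).2 ?_
      intro s
      rw [PySem.List.mem_dedup, PySem.Set.mem_ofList]
      exact hsubsperm.mem_iff
    · exact pv_dedup_pairwise_lt _ (pv_subs_pairwise S hpair t)
  rw [hsorted, hgather]
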